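-- pv_equiv track=rewrite | github.com/wonderworks-software/PyFlow | PyFlow/Core/Widget.py | _isCategoryExists
-- ===== SOURCE A (Python) =====
-- def _isCategoryExists(category_name, categories):
--     bFound = False
--     if category_name in categories:
--         return True
--     if not bFound:
--         for c in categories:
--             sepCatNames = c.split('|')
--             if len(sepCatNames) == 1:
--                 if category_name == c:
--                     return True
--             else:
--                 for i in range(0, len(sepCatNames)):
--                     c = '|'.join(sepCatNames)
--                     if category_name == c:
--                         return True
--                     sepCatNames.pop()
--     return False
-- ===== SOURCE B (Python) =====
-- def _isCategoryExists(category_name, categories):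
--     prefixes = set()
--     for c in categories:
--         parts = c.split('|')
--         for i in range(len(parts)):
--             prefixes.add('|'.join(parts[:i + 1]))
--     return category_name in prefixes
-- ===== Notes on version B (the rewrite author's own statement) =====
-- stated objective: alternative
-- what changed: A scans the categories, re-splitting each one and reconstructing its '|'-joined prefixes in an inner pop-loop with early exit; B builds the set of all segment-prefixes in one pass and answers with a single set-membership test.
import Mathlib
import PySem

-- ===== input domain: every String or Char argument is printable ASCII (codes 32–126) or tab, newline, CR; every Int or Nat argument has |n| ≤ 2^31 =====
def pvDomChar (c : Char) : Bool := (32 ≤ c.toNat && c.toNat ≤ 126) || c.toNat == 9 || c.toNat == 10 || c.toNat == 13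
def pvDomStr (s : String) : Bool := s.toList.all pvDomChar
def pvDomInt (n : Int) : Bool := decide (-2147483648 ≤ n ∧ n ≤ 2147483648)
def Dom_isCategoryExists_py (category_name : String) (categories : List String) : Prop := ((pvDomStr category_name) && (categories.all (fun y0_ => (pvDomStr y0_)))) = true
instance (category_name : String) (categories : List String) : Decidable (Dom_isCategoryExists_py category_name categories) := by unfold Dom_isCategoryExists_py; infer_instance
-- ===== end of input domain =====

-- B replaces A's per-category scan that reconstructs '|'-joined prefixes with early exit
-- by building the set of all segment-prefixes once and answering with one membership test (alternative decomposition).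

-- ===== PORT A =====
-- inner 'for i in range(0, len(sepCatNames))' loop: fuel = remaining iterations; sep.pop() on a
-- nonempty list is dropLast (the loop pops exactly len times starting from a len-element list, so pop never sees [])
def pvAInner (name : String) : List String → Nat → Bool
  | _, 0 => false
  | sep, n + 1 =>
    let c := PySem.Str.join "|" sep
    if name == c then true else pvAInner name sep.dropLast n

-- outer 'for c in categories' loop with early return
def pvALoop (name : String) : List String → Bool
  | [] => false
  | c :: rest =>
    let sep := (PySem.Str.split? c "|").getD []   -- separator "|" ≠ "", so split? is always `some`: getD is exact
    if sep.length == 1 then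
      (if name == c then true else pvALoop name rest)
    else
      (if pvAInner name sep sep.length then true else pvALoop name rest)

def isCategoryExists_py (category_name : String) (categories : List String) : Bool :=
  if categories.contains category_name then true
  else pvALoop category_name categories    -- 'if not bFound' is always taken (bFound stays False)

-- ===== PORT B =====
def pvBAdd (s : PySem.Set String) (c : String) : PySem.Set String :=
  let parts := (PySem.Str.split? c "|").getD []   -- separator "|" ≠ "": getD is exact
  (PySem.List.pyRange 0 parts.length 1).foldl
    (fun s i => PySem.Set.add s (PySem.Str.join "|" (PySem.List.slice parts none (some (i + 1))))) s

def isCategoryExists_py_alt (category_name : String) (categories : List String) : Bool :=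
  PySem.Set.contains (categories.foldl pvBAdd PySem.Set.empty) category_name

-- ===== PRECONDITION & SPEC =====
def Spec_isCategoryExists_py (category_name : String) (categories : List String) (out : Bool) : Prop := out = isCategoryExists_py_alt category_name categories
instance (category_name : String) (categories : List String) (out : Bool) : Decidable (Spec_isCategoryExists_py category_name categories out) := by unfold Spec_isCategoryExists_py; infer_instance

-- ===== CLAIM (what is proved, stated in full; the proofs are below) =====
def Claim_equal_isCategoryExists_py : Prop := ∀ (category_name : String) (categories : List String), Dom_isCategoryExists_py category_name categories → Spec_isCategoryExists_py category_name categories (isCategoryExists_py category_name categories)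

-- ===== LEMMAS AND PROOFS =====

-- the '|'-segment prefixes of a category, longest last
def pvPrefixes (c : String) : List String :=
  let parts := (PySem.Str.split? c "|").getD []
  (List.range parts.length).map (fun k => PySem.Str.join "|" (parts.take (k + 1)))

-- the common pure form of both programs
def pvPure (name : String) (cats : List String) : Bool :=
  cats.any (fun c => (pvPrefixes c).contains name)

-- '|'.join over a nonempty cons
theorem pv_intercalate_cons (sep x : List Char) (t : List (List Char)) (h : t ≠ []) :
    sep.intercalate (x :: t) = x ++ sep ++ sep.intercalate t := by
  cases t with
  | nil => exact absurd rfl h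
  | cons y ys => simp [List.intercalate, List.intersperse, List.append_assoc]

-- merging the last two pieces with the separator does not change the intercalation
theorem pv_intercalate_merge (sep : List Char) (xs : List (List Char)) (a b : List Char) :
    sep.intercalate (xs ++ [a, b]) = sep.intercalate (xs ++ [a ++ sep ++ b]) := by
  induction xs with
  | nil =>
    rw [List.nil_append, List.nil_append, pv_intercalate_cons sep a [b] (by simp)]
    simp [List.intercalate, List.append_assoc]
  | cons x xs ih =>
    rw [List.cons_append, List.cons_append,
      pv_intercalate_cons sep x _ (by simp), pv_intercalate_cons sep x _ (by simp), ih]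

theorem pv_go_join (sep : List Char) (hsep : sep ≠ []) :
    ∀ (fuel : Nat) (l cur : List Char) (acc : List (List Char)), l.length < fuel →
      sep.intercalate (PySem.Chars.splitOn.go sep fuel l cur acc)
        = sep.intercalate (acc.reverse ++ [cur.reverse ++ l]) := by
  intro fuel
  induction fuel with
  | zero => intro l cur acc h; exact absurd h (by omega)
  | succ n ih =>
    intro l cur acc h
    cases l with
    | nil => simp [PySem.Chars.splitOn.go]
    | cons c rest =>
      rw [PySem.Chars.splitOn.go]
      by_cases hp : sep.isPrefixOf (c :: rest) = true
      · simp only [hp, if_true]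
        have hpre : sep <+: (c :: rest) := by
          exact List.isPrefixOf_iff_prefix.mp hp
        have hdec : (List.drop sep.length (c :: rest)).length < n := by
          have h1 : 0 < sep.length := List.length_pos_of_ne_nil hsep
          simp at h ⊢
          omega
        rw [ih _ _ _ hdec]
        obtain ⟨t, ht⟩ := hpre
        have hd : List.drop sep.length (c :: rest) = t := by rw [← ht]; simp
        have heq : (c :: rest) = sep ++ List.drop sep.length (c :: rest) := by
          rw [hd, ht]
        calc sep.intercalate ((cur.reverse :: acc).reverse ++ [[] ++ List.drop sep.length (c :: rest)])
            = sep.intercalate (acc.reverse ++ [cur.reverse, List.drop sep.length (c :: rest)]) := by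
              simp
          _ = sep.intercalate (acc.reverse ++ [cur.reverse ++ sep ++ List.drop sep.length (c :: rest)]) := by
              rw [pv_intercalate_merge]
          _ = sep.intercalate (acc.reverse ++ [cur.reverse ++ (c :: rest)]) := by
              rw [List.append_assoc, ← heq]
      · rw [if_neg hp]
        rw [ih _ _ _ (by simp at h ⊢; omega)]
        simp

theorem pv_roundtrip_chars (cs sep : List Char) (hsep : sep ≠ []) :
    sep.intercalate (PySem.Chars.splitOn cs sep) = cs := by
  unfold PySem.Chars.splitOn
  rw [pv_go_join sep hsep _ _ _ _ (by omega)]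
  simp [List.intercalate]

theorem pv_go_ne_nil (sep : List Char) :
    ∀ (fuel : Nat) (l cur : List Char) (acc : List (List Char)),
      PySem.Chars.splitOn.go sep fuel l cur acc ≠ [] := by
  intro fuel
  induction fuel with
  | zero => intro l cur acc; rw [PySem.Chars.splitOn.go]; simp
  | succ n ih =>
    intro l cur acc
    cases l with
    | nil => rw [PySem.Chars.splitOn.go]; simp; omega
    | cons c rest =>
      rw [PySem.Chars.splitOn.go]
      by_cases hp : sep.isPrefixOf (c :: rest) = true <;> simp [hp, ih]

-- Str-level facts about parts = c.split('|')
theorem pv_parts_ne_nil (c : String) : (PySem.Str.split? c "|").getD [] ≠ [] := by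
  simp [PySem.Str.split?, PySem.Chars.split?]
  intro h
  exact pv_go_ne_nil _ _ _ _ _ h

theorem pv_join_parts (c : String) :
    PySem.Str.join "|" ((PySem.Str.split? c "|").getD []) = c := by
  simp only [PySem.Str.split?, PySem.Chars.split?, PySem.Str.join, PySem.Chars.join]
  simp only [List.isEmpty_iff]
  rw [if_neg (by simp : ¬ ("|".toList = ([] : List Char)))]
  simp only [Option.map_some, Option.getD_some, List.map_map]
  have : (List.map (String.toList ∘ String.ofList) (PySem.Chars.splitOn c.toList "|".toList))
      = PySem.Chars.splitOn c.toList "|".toList := by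
    simp [Function.comp_def]
  rw [this, pv_roundtrip_chars c.toList "|".toList (by simp)]
  exact String.ofList_toList

-- membership in a mapped list as an `any` with the element equality A and B test
theorem pv_contains_map (l : List Nat) (f : Nat → String) (x : String) :
    (l.map f).contains x = l.any (fun k => x == f k) := by
  rw [Bool.eq_iff_iff]; simp
  exact ⟨fun ⟨a, h1, h2⟩ => ⟨a, h1, h2.symm⟩, fun ⟨a, h1, h2⟩ => ⟨a, h1, h2.symm⟩⟩

-- A's inner loop checks exactly the prefixes of sep (longest first)
theorem pv_inner_eq (name : String) :
    ∀ (n : Nat) (sep : List String), n = sep.length →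
      pvAInner name sep n
        = (List.range n).any (fun k => name == PySem.Str.join "|" (sep.take (k + 1))) := by
  intro n
  induction n with
  | zero => intro sep h; rfl
  | succ m ih =>
    intro sep h
    have htake : sep.take (m + 1) = sep := by rw [h]; exact List.take_length
    have hcong : ∀ k ∈ List.range m,
        (name == PySem.Str.join "|" (sep.dropLast.take (k + 1)))
          = (name == PySem.Str.join "|" (sep.take (k + 1))) := by
      intro k hk
      rw [List.mem_range] at hk
      rw [List.dropLast_eq_take, List.take_take, Nat.min_def, if_pos (by omega)]
    simp only [pvAInner, List.range_succ, List.any_append, List.any_cons, List.any_nil,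
      Bool.or_false, htake]
    rw [ih sep.dropLast (by rw [List.length_dropLast]; omega), PySem.List.any_congr_mem hcong]
    cases hb : name == PySem.Str.join "|" sep <;> simp

-- A's outer loop = pvPure
-- the per-category test of A's two branches, as membership in pvPrefixes
theorem pv_prefixes_singleton (c : String) (h : ((PySem.Str.split? c "|").getD []).length = 1) :
    pvPrefixes c = [c] := by
  unfold pvPrefixes
  simp only [h, List.range_one, List.map_cons, List.map_nil]
  rw [show (0 + 1 = 1) from rfl, ← h, List.take_length, pv_join_parts]

theorem pv_aloop_eq (name : String) (cats : List String) :
    pvALoop name cats = pvPure name cats := by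
  induction cats with
  | nil => rfl
  | cons c rest ih =>
    have hp : pvPure name (c :: rest) = ((pvPrefixes c).contains name || pvPure name rest) := by
      simp [pvPure]
    rw [hp]
    by_cases h1 : ((PySem.Str.split? c "|").getD []).length = 1
    · have hpref : pvPrefixes c = [c] := pv_prefixes_singleton c h1
      simp only [pvALoop, h1, beq_self_eq_true, if_true, ih, hpref, List.contains_cons]
      cases hb : name == c <;> simp
    · have hb1 : (((PySem.Str.split? c "|").getD []).length == 1) = false := by
        simp [h1]
      simp only [pvALoop, hb1, ih]
      rw [pv_inner_eq name (((PySem.Str.split? c "|").getD []).length) _ rfl]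
      unfold pvPrefixes
      rw [pv_contains_map]
      cases hA : (List.range ((PySem.Str.split? c "|").getD []).length).any
          (fun k => name == PySem.Str.join "|" (((PySem.Str.split? c "|").getD []).take (k + 1))) <;>
        simp

-- membership of the full category implies pvPure
theorem pv_mem_pure (name : String) (cats : List String) (h : cats.contains name = true) :
    pvPure name cats = true := by
  have hmem : name ∈ cats := by simpa using h
  have hlen : 0 < ((PySem.Str.split? name "|").getD []).length :=
    List.length_pos_of_ne_nil (pv_parts_ne_nil name)
  have hself : name ∈ pvPrefixes name := by
    unfold pvPrefixes
    refine List.mem_map.mpr ⟨((PySem.Str.split? name "|").getD []).length - 1,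
      List.mem_range.mpr (by omega), ?_⟩
    rw [Nat.sub_add_cancel hlen, List.take_length, pv_join_parts]
  unfold pvPure
  simp only [List.any_eq_true]
  exact ⟨name, hmem, by simpa using hself⟩

theorem pv_a_eq (name : String) (cats : List String) :
    isCategoryExists_py name cats = pvPure name cats := by
  unfold isCategoryExists_py
  cases h : cats.contains name with
  | true => rw [if_pos rfl, (pv_mem_pure name cats h)]
  | false => rw [if_neg (by simp), pv_aloop_eq]

theorem pv_contains_add (s : PySem.Set String) (x y : String) :
    PySem.Set.contains (PySem.Set.add s x) y = (PySem.Set.contains s y || (y == x)) := by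
  rw [Bool.eq_iff_iff]
  simp [PySem.Set.contains, PySem.Set.mem_add]

theorem pv_contains_foldl_add {α : Type} (g : α → String) (name : String) :
    ∀ (l : List α) (s : PySem.Set String),
      PySem.Set.contains (l.foldl (fun s i => PySem.Set.add s (g i)) s) name
        = (PySem.Set.contains s name || l.any (fun i => name == g i)) := by
  intro l
  induction l with
  | nil => intro s; simp
  | cons a t ih =>
    intro s
    rw [List.foldl_cons, ih (PySem.Set.add s (g a)), pv_contains_add, List.any_cons, Bool.or_assoc]

theorem pv_bAdd_contains (name : String) (s : PySem.Set String) (c : String) :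
    PySem.Set.contains (pvBAdd s c) name
      = (PySem.Set.contains s name || (pvPrefixes c).contains name) := by
  unfold pvBAdd
  rw [pv_contains_foldl_add]
  congr 1
  unfold pvPrefixes
  rw [pv_contains_map, PySem.List.pyRange_one]
  simp only [Int.sub_zero, Int.toNat_natCast, List.any_map]
  refine PySem.List.any_congr_mem (fun k _ => ?_)
  simp only [Function.comp_apply]
  have hcast : ((0 : Int) + (k : Int)) + 1 = ((k + 1 : Nat) : Int) := by push_cast; ring
  rw [hcast, PySem.List.slice_to_natCast]

theorem pv_b_eq (name : String) (cats : List String) :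
    isCategoryExists_py_alt name cats = pvPure name cats := by
  unfold isCategoryExists_py_alt
  have key : ∀ (l : List String) (s : PySem.Set String),
      PySem.Set.contains (l.foldl pvBAdd s) name = (PySem.Set.contains s name || pvPure name l) := by
    intro l
    induction l with
    | nil => intro s; simp [pvPure]
    | cons c t ih =>
      intro s
      simp only [List.foldl_cons, ih, pv_bAdd_contains, pvPure, List.any_cons]
      rw [Bool.or_assoc]
  rw [key]
  simp [PySem.Set.empty, PySem.Set.contains, pvPure]

-- ===== VERDICT (by name: the statement is the Claim_ definition above) =====
theorem isCategoryExists_py_spec : Claim_equal_isCategoryExists_py := by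
  intro name cats _
  unfold Spec_isCategoryExists_py
  rw [pv_a_eq, pv_b_eq]
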